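-- pv_equiv track=rewrite | github.com/glbala87/ELLA_tool | src/vardb/deposit/vcfutil/vcfhelper.py | compare_alleles
-- ===== SOURCE A (Python) =====
-- def compare_alleles(ref, alt):
--     """Returns start offset, length, changeType, changeFrom, and changeTo
--     after comparing alt allele with reference.
--
--     Start offset is the offset of first differing base:
--     0 for SNPs, and +1 for insertions/deletions (which must be corrected for).
--     length is 1 if SNP, or length of deletion/insertion if del/ins/indel.
--     changeType is SNP, ins, del, or indel.
--     changeFrom/changeTo is empty string if ins/del respectively,
--     for indels changeFrom is what is deleted and changeTo is what is inserted.
--     """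
--     # If it's a simple SNV, don't remap anything
--     if len(ref) == 1 and len(alt) == 1:
--         return 0, 1, "SNP", ref, alt
--     assert len(ref) >= 1 and len(alt) >= 1
--     offset = 0
--     # strip off identical suffixes
--     while (min(len(alt), len(ref)) > 0) and (alt[-1] == ref[-1]):
--         alt = alt[:-1]
--         ref = ref[:-1]
--     # strip off identical prefixes and increment position
--     while (min(len(alt), len(ref)) > 0) and (alt[0] == ref[0]):
--         alt = alt[1:]
--         ref = ref[1:]
--         offset += 1
--     if len(ref) == len(alt) == 1:
--         changeType = "SNP"
--     elif len(ref) == 0: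
--         changeType = "ins"
--     elif len(alt) == 0:
--         changeType = "del"
--     else:
--         changeType = "indel"
--     return offset, max(len(ref), len(alt)), changeType, ref, alt
-- ===== SOURCE B (Python) =====
-- def _common_prefix_len(xs, ys):
--     k = 0
--     for x, y in zip(xs, ys):
--         if x != y:
--             break
--         k += 1
--     return k
--
--
-- def compare_alleles(ref, alt):
--     if len(ref) == 1 and len(alt) == 1:
--         return 0, 1, "SNP", ref, alt
--     n, m = len(ref), len(alt)
--     # common suffix length, then common prefix length of the remainder: one pass each
--     s = _common_prefix_len(ref[::-1], alt[::-1])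
--     p = _common_prefix_len(ref[: n - s], alt[: m - s])
--     r = ref[p : n - s]
--     a = alt[p : m - s]
--     if len(r) == 1 and len(a) == 1:
--         changeType = "SNP"
--     elif len(r) == 0:
--         changeType = "ins"
--     elif len(a) == 0:
--         changeType = "del"
--     else:
--         changeType = "indel"
--     return p, max(len(r), len(a)), changeType, r, a
-- ===== Notes on version B (the rewrite author's own statement) =====
-- stated objective: faster
-- what changed: B counts the common suffix and prefix lengths with two linear scans and takes one slice, instead of A's while-loops that re-slice the whole strings one character at a time (quadratic copying).
import Mathlib
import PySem

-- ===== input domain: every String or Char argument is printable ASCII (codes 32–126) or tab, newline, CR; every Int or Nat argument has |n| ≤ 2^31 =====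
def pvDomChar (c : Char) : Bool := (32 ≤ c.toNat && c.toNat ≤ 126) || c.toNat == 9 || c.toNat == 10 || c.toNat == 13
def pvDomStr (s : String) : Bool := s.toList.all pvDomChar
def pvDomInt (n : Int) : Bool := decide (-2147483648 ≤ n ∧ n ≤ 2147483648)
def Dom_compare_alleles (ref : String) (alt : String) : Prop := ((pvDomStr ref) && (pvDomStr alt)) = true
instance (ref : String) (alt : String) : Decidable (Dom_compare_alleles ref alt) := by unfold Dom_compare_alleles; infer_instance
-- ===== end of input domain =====

-- B replaces A's quadratic repeated one-character re-slicing by two linear common-affix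
-- counts and a single slice; equivalence is about the return value (neither mutates).

-- ===== PORT A =====
-- while (min(len(alt),len(ref)) > 0) and (alt[-1] == ref[-1]): strip last char of both
def pvASufLoop : List Char → List Char → List Char × List Char
  | ref, alt =>
    if h : 0 < min alt.length ref.length ∧ alt.getLast? = ref.getLast? then
      pvASufLoop ref.dropLast alt.dropLast
    else
      (ref, alt)
termination_by ref _ => ref.length
decreasing_by
  have : 0 < ref.length := lt_of_lt_of_le h.1 (min_le_right _ _)
  simp [List.length_dropLast]; omega

-- while (min(len(alt),len(ref)) > 0) and (alt[0] == ref[0]): strip first char, offset += 1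
def pvAPreLoop : List Char → List Char → Int → List Char × List Char × Int
  | ref, alt, off =>
    if h : 0 < min alt.length ref.length ∧ alt.head? = ref.head? then
      pvAPreLoop ref.tail alt.tail (off + 1)
    else
      (ref, alt, off)
termination_by ref _ _ => ref.length
decreasing_by
  have : 0 < ref.length := lt_of_lt_of_le h.1 (min_le_right _ _)
  simp [List.length_tail]; omega

def compare_alleles (ref : String) (alt : String) : Int × Int × String × String × String :=
  let r := ref.toList
  let a := alt.toList
  if r.length = 1 ∧ a.length = 1 then (0, 1, "SNP", ref, alt)
  else
    let (r1, a1) := pvASufLoop r a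
    let (r2, a2, off) := pvAPreLoop r1 a1 0
    let ct := if r2.length = 1 ∧ a2.length = 1 then "SNP"
      else if r2.length = 0 then "ins"
      else if a2.length = 0 then "del"
      else "indel"
    (off, (max r2.length a2.length : Nat), ct, String.ofList r2, String.ofList a2)

-- ===== PORT B =====
-- length of the common prefix of two char lists (Source B's _common_prefix_len)
def pvCpl : List Char → List Char → Nat
  | x :: xs, y :: ys => if x = y then pvCpl xs ys + 1 else 0
  | _, _ => 0

def compare_alleles_alt (ref : String) (alt : String) : Int × Int × String × String × String :=
  let r := ref.toList
  let a := alt.toList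
  if r.length = 1 ∧ a.length = 1 then (0, 1, "SNP", ref, alt)
  else
    let s := pvCpl r.reverse a.reverse
    let r1 := r.take (r.length - s)
    let a1 := a.take (a.length - s)
    let p := pvCpl r1 a1
    let r2 := r1.drop p
    let a2 := a1.drop p
    let ct := if r2.length = 1 ∧ a2.length = 1 then "SNP"
      else if r2.length = 0 then "ins"
      else if a2.length = 0 then "del"
      else "indel"
    ((p : Int), (max r2.length a2.length : Nat), ct, String.ofList r2, String.ofList a2)

-- ===== PRECONDITION & SPEC =====
-- A asserts len(ref) >= 1 and len(alt) >= 1 (AssertionError on an empty allele string).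
def Pre_compare_alleles (ref : String) (alt : String) : Prop := ref ≠ "" ∧ alt ≠ ""
instance (ref : String) (alt : String) : Decidable (Pre_compare_alleles ref alt) := by unfold Pre_compare_alleles; infer_instance
def pvWitness_compare_alleles : String × String := ("TAG", "TG")

def Spec_compare_alleles (ref : String) (alt : String) (out : Int × Int × String × String × String) : Prop := out = compare_alleles_alt ref alt
instance (ref : String) (alt : String) (out : Int × Int × String × String × String) : Decidable (Spec_compare_alleles ref alt out) := by unfold Spec_compare_alleles; infer_instance

-- ===== CLAIM (what is proved, stated in full; the proofs are below) =====
def Claim_equal_compare_alleles : Prop := ∀ (ref : String) (alt : String), Dom_compare_alleles ref alt → Pre_compare_alleles ref alt → Spec_compare_alleles ref alt (compare_alleles ref alt)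

-- ===== LEMMAS AND PROOFS =====

theorem pvCpl_le_left : ∀ (xs ys : List Char), pvCpl xs ys ≤ xs.length := by
  intro xs
  induction xs with
  | nil => intro ys; cases ys <;> simp [pvCpl]
  | cons x xs ih =>
    intro ys
    cases ys with
    | nil => simp [pvCpl]
    | cons y ys =>
      simp only [pvCpl]
      split
      · have := ih ys; simp; omega
      · simp

theorem pvCpl_le_right : ∀ (xs ys : List Char), pvCpl xs ys ≤ ys.length := by
  intro xs
  induction xs with
  | nil => intro ys; cases ys <;> simp [pvCpl]
  | cons x xs ih =>
    intro ys
    cases ys with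
    | nil => simp [pvCpl]
    | cons y ys =>
      simp only [pvCpl]
      split
      · have := ih ys; simp; omega
      · simp

theorem pvCpl_nil_right (xs : List Char) : pvCpl xs [] = 0 := by
  cases xs <;> rfl

theorem pvAPreLoop_eq : ∀ (r a : List Char) (off : Int),
    pvAPreLoop r a off = (r.drop (pvCpl r a), a.drop (pvCpl r a), off + (pvCpl r a : Int)) := by
  intro r a off
  fun_induction pvAPreLoop r a off with
  | case1 r a off h ih =>
    obtain ⟨hlen, hhd⟩ := h
    have hr : r ≠ [] := by intro hr; subst hr; simp at hlen
    have ha : a ≠ [] := by intro ha; subst ha; simp at hlen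
    obtain ⟨x, xs, rfl⟩ := List.exists_cons_of_ne_nil hr
    obtain ⟨y, ys, rfl⟩ := List.exists_cons_of_ne_nil ha
    simp only [List.head?_cons, Option.some.injEq] at hhd
    subst hhd
    simp only [List.tail_cons] at ih ⊢
    rw [ih]
    simp only [pvCpl, Prod.mk.injEq]
    refine ⟨rfl, rfl, ?_⟩
    push_cast
    ring
  | case2 r a off h =>
    rcases r with _ | ⟨x, xs⟩
    · simp [pvCpl]
    · rcases a with _ | ⟨y, ys⟩
      · simp [pvCpl]
      · have hxy' : ¬ (x = y) := by
          intro hh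
          exact h ⟨by simp, by simp [hh]⟩
        simp [pvCpl, hxy']

theorem pvASufLoop_eq : ∀ (r a : List Char),
    pvASufLoop r a = (r.take (r.length - pvCpl r.reverse a.reverse),
                      a.take (a.length - pvCpl r.reverse a.reverse)) := by
  intro r a
  fun_induction pvASufLoop r a with
  | case1 r a h ih =>
    obtain ⟨hlen, hlast⟩ := h
    have hr : r ≠ [] := by intro hr; subst hr; simp at hlen
    have ha : a ≠ [] := by intro ha; subst ha; simp at hlen
    obtain ⟨c, t, hc⟩ := List.exists_cons_of_ne_nil (by simpa using hr : r.reverse ≠ [])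
    obtain ⟨d, u, hd⟩ := List.exists_cons_of_ne_nil (by simpa using ha : a.reverse ≠ [])
    have hrr : r = t.reverse ++ [c] := by
      have := congrArg List.reverse hc; simpa using this
    have haa : a = u.reverse ++ [d] := by
      have := congrArg List.reverse hd; simpa using this
    have hcd : d = c := by
      have h1 : r.getLast? = some c := by rw [← List.head?_reverse, hc]; rfl
      have h2 : a.getLast? = some d := by rw [← List.head?_reverse, hd]; rfl
      rw [h1, h2] at hlast; simpa using hlast
    subst hcd
    have hdropr : r.dropLast = t.reverse := by rw [hrr]; simp
    have hdropa : a.dropLast = u.reverse := by rw [haa]; simp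
    rw [hdropr, hdropa] at ih
    simp only [List.reverse_reverse, List.length_reverse] at ih
    rw [hdropr, hdropa, ih]
    have hs : pvCpl r.reverse a.reverse = pvCpl t u + 1 := by
      rw [hc, hd]; simp [pvCpl]
    have hst : pvCpl t u ≤ t.length := pvCpl_le_left t u
    have hsu : pvCpl t u ≤ u.length := pvCpl_le_right t u
    rw [hs]
    conv_rhs => rw [hrr, haa]
    simp only [Prod.mk.injEq, List.length_append, List.length_reverse,
      List.length_cons, List.length_nil]
    constructor
    · rw [List.take_append_of_le_length (by simp only [List.length_reverse]; omega)]
      congr 1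
      omega
    · rw [List.take_append_of_le_length (by simp only [List.length_reverse]; omega)]
      congr 1
      omega
  | case2 r a h =>
    rcases r with _ | ⟨x, xs⟩
    · simp [pvCpl]
    · rcases a with _ | ⟨y, ys⟩
      · simp [pvCpl_nil_right]
      · have hne : (y :: ys).getLast? ≠ (x :: xs).getLast? := by
          intro hh
          exact h ⟨by simp, hh⟩
        obtain ⟨c, t, hc⟩ := List.exists_cons_of_ne_nil (by simp : (x :: xs).reverse ≠ [])
        obtain ⟨d, u, hd⟩ := List.exists_cons_of_ne_nil (by simp : (y :: ys).reverse ≠ [])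
        have h1 : (x :: xs).getLast? = some c := by rw [← List.head?_reverse, hc]; rfl
        have h2 : (y :: ys).getLast? = some d := by rw [← List.head?_reverse, hd]; rfl
        have hdc : ¬ (c = d) := by
          intro hh; apply hne; rw [h1, h2, hh]
        rw [hc, hd]
        simp [pvCpl, hdc]

-- ===== VERDICT (by name: the statement is the Claim_ definition above) =====
theorem compare_alleles_spec : Claim_equal_compare_alleles := by
  unfold Claim_equal_compare_alleles
  intro ref alt _ _
  unfold Spec_compare_alleles compare_alleles compare_alleles_alt
  simp only [pvASufLoop_eq, pvAPreLoop_eq]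
  split
  · rfl
  · simp
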